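-- pv_equiv track=rewrite | github.com/Plcherra/callbot | backend/voice/pipeline_templates.py | _openings_line_from_summary_periods
-- ===== SOURCE A (Python) =====
-- def _openings_line_from_summary_periods(periods: list[str]) -> str:
--     """Spoken bucket summary (morning / afternoon / evening) from tool `summary_periods`."""
--     order = ("morning", "afternoon", "evening")
--     seen = {p.lower() for p in periods if isinstance(p, str)}
--     ordered = [p for p in order if p in seen]
--     if not ordered:
--         return "I have some openings"
--     if len(ordered) == 1:
--         return f"I have {ordered[0]} openings"
--     if len(ordered) == 2:
--         return f"I have {ordered[0]} and {ordered[1]} openings"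
--     return f"I have {ordered[0]}, {ordered[1]}, and {ordered[2]} openings"
-- ===== SOURCE B (Python) =====
-- def _openings_line_from_summary_periods(periods: list[str]) -> str:
--     """Spoken bucket summary (morning / afternoon / evening) from tool `summary_periods`."""
--     m = a = e = False
--     for p in periods:
--         if isinstance(p, str):
--             w = p.lower()
--             m = m or w == "morning"
--             a = a or w == "afternoon"
--             e = e or w == "evening"
--     table = {
--         (False, False, False): "I have some openings",
--         (True, False, False): "I have morning openings",
--         (False, True, False): "I have afternoon openings",
--         (False, False, True): "I have evening openings",
--         (True, True, False): "I have morning and afternoon openings",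
--         (True, False, True): "I have morning and evening openings",
--         (False, True, True): "I have afternoon and evening openings",
--         (True, True, True): "I have morning, afternoon, and evening openings",
--     }
--     return table[(m, a, e)]
-- ===== Notes on version B (the rewrite author's own statement) =====
-- stated objective: alternative
-- what changed: B replaces A's set-build, ordered filter and 0/1/2/3-length case ladder with a single fold maintaining three boolean flags (morning/afternoon/evening seen) and one lookup in a precomputed 8-entry sentence table keyed by the flag triple.
import Mathlib
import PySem

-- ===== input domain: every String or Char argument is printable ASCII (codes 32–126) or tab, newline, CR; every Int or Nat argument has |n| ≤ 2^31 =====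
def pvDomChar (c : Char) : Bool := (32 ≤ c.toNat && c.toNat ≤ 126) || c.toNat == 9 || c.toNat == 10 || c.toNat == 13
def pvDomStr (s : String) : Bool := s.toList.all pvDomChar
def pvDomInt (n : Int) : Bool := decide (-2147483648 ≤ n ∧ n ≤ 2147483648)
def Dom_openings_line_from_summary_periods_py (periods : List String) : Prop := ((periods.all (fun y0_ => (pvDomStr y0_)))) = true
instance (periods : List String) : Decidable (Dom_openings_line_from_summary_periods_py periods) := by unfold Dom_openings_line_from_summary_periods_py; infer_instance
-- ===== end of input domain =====

-- B replaces A's set/filter/case-ladder with one boolean-flag fold plus an 8-entry sentence table (objective: alternative).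


-- ===== PORT A =====
-- Transliteration of A: set of lowered periods, filter fixed order, branch on 0/1/2/3 items.
-- (the isinstance(p, str) guard is vacuous on List String and is omitted)
def openings_line_from_summary_periods_py (periods : List String) : String :=
  let seen : PySem.Set String := PySem.Set.ofList (periods.map (fun p => PySem.Str.lower p))
  let ordered := (["morning", "afternoon", "evening"] : List String).filter (fun p => PySem.Set.contains seen p)
  if ordered = [] then "I have some openings"
  else if ordered.length = 1 then "I have " ++ ordered[0]! ++ " openings"
  else if ordered.length = 2 then "I have " ++ ordered[0]! ++ " and " ++ ordered[1]! ++ " openings"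
  else "I have " ++ ordered[0]! ++ ", " ++ ordered[1]! ++ ", and " ++ ordered[2]! ++ " openings"

-- ===== PORT B =====
-- Transliteration of B: one fold over periods keeping three boolean flags, then a lookup in the
-- 8-entry sentence table keyed by the flag triple.  The key (m, a, e) is always one of the 8 table
-- keys, so Python's table[(m, a, e)] never raises KeyError; getD with "" is exact here.
def openings_line_from_summary_periods_py_alt (periods : List String) : String :=
  let flags : Bool × Bool × Bool := periods.foldl
    (fun st p =>
      let w := PySem.Str.lower p
      (st.1 || w == "morning", st.2.1 || w == "afternoon", st.2.2 || w == "evening"))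
    (false, false, false)
  let table : PySem.Dict (Bool × Bool × Bool) String := PySem.Dict.ofList
    [((false, false, false), "I have some openings"),
     ((true, false, false), "I have morning openings"),
     ((false, true, false), "I have afternoon openings"),
     ((false, false, true), "I have evening openings"),
     ((true, true, false), "I have morning and afternoon openings"),
     ((true, false, true), "I have morning and evening openings"),
     ((false, true, true), "I have afternoon and evening openings"),
     ((true, true, true), "I have morning, afternoon, and evening openings")]
  PySem.Dict.getD table flags ""

-- ===== PRECONDITION & SPEC =====
def Spec_openings_line_from_summary_periods_py (periods : List String) (out : String) : Prop := out = openings_line_from_summary_periods_py_alt periods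
instance (periods : List String) (out : String) : Decidable (Spec_openings_line_from_summary_periods_py periods out) := by unfold Spec_openings_line_from_summary_periods_py; infer_instance

-- ===== CLAIM (what is proved, stated in full; the proofs are below) =====
def Claim_equal_openings_line_from_summary_periods_py : Prop := ∀ (periods : List String), Dom_openings_line_from_summary_periods_py periods → Spec_openings_line_from_summary_periods_py periods (openings_line_from_summary_periods_py periods)

-- ===== LEMMAS AND PROOFS =====

-- A's membership test over the lowered set equals the direct any-scan.
theorem cond_eq (periods : List String) (w : String) :
    PySem.Set.contains (PySem.Set.ofList (periods.map (fun p => PySem.Str.lower p))) w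
      = periods.any (fun p => PySem.Str.lower p == w) := by
  rw [Bool.eq_iff_iff, PySem.Set.contains_iff, List.any_eq_true]
  simp [PySem.Set.mem_ofList, List.mem_map, beq_iff_eq]

-- B's flag fold computes exactly the three any-scans.
theorem flags_eq (periods : List String) : ∀ (m a e : Bool),
    periods.foldl
      (fun (st : Bool × Bool × Bool) p =>
        let w := PySem.Str.lower p
        (st.1 || w == "morning", st.2.1 || w == "afternoon", st.2.2 || w == "evening"))
      (m, a, e)
    = (m || periods.any (fun p => PySem.Str.lower p == "morning"),
       a || periods.any (fun p => PySem.Str.lower p == "afternoon"),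
       e || periods.any (fun p => PySem.Str.lower p == "evening")) := by
  induction periods with
  | nil => simp
  | cons p l ih =>
    intro m a e
    simp only [List.foldl_cons, List.any_cons, ih, Bool.or_assoc]

-- ===== VERDICT (by name: the statement is the Claim_ definition above) =====
theorem openings_line_from_summary_periods_py_spec : Claim_equal_openings_line_from_summary_periods_py := by
  intro periods _
  show openings_line_from_summary_periods_py periods = openings_line_from_summary_periods_py_alt periods
  unfold openings_line_from_summary_periods_py openings_line_from_summary_periods_py_alt
  simp only [cond_eq, flags_eq, Bool.false_or]
  cases h1 : periods.any (fun p => PySem.Str.lower p == "morning") <;>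
    cases h2 : periods.any (fun p => PySem.Str.lower p == "afternoon") <;>
      cases h3 : periods.any (fun p => PySem.Str.lower p == "evening") <;>
        simp [h1, h2, h3, List.filter] <;> decide
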